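-- pv_equiv track=rewrite | github.com/mss3331/Nerthus_videoBasedExperiments | helpers_dataloading.py | makeSubVideos
-- ===== SOURCE A (Python) =====
-- def makeSubVideos(imageList, target_labels, partitions,):
--     subvideo_images_list = []
--     subvideo_labels_list = []
--     subvideo_path_list = []
--
--     for shift in range(partitions):
--         subvideo_images_list.append(imageList[shift::partitions])
--         subvideo_labels_list.append(target_labels[shift::partitions])
--         subvideo_path_list.append(imageList[shift::partitions])
--     return subvideo_images_list,subvideo_labels_list, subvideo_path_list
-- ===== SOURCE B (Python) =====
-- def makeSubVideos(imageList, target_labels, partitions):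
--     if partitions <= 0:
--         return [], [], []
--     images = [[] for _ in range(partitions)]
--     paths = [[] for _ in range(partitions)]
--     labels = [[] for _ in range(partitions)]
--     for i, img in enumerate(imageList):
--         images[i % partitions].append(img)
--         paths[i % partitions].append(img)
--     for i, lab in enumerate(target_labels):
--         labels[i % partitions].append(lab)
--     return images, labels, paths
-- ===== Notes on version B (the rewrite author's own statement) =====
-- stated objective: alternative
-- what changed: Replaces the per-partition strided-slice loop (one strided slice per bucket) by a single scatter pass that appends each element to bucket i % partitions, plus one pass over the labels.
import Mathlib
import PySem

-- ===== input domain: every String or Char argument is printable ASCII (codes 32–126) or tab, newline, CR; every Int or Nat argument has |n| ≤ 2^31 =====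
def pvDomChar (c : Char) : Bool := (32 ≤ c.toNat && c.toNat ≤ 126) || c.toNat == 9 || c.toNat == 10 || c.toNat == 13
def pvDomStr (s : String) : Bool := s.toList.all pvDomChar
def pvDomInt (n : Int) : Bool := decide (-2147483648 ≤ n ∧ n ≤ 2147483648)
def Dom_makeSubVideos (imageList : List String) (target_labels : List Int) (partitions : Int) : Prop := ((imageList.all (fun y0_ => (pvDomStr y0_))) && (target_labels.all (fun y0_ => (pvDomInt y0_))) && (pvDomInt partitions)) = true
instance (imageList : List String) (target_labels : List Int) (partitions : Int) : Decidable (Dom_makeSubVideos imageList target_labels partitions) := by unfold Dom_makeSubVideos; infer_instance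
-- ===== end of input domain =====

-- B replaces A's per-partition strided-slice loop by a single modulo-scatter pass over each
-- input list (objective: alternative — a genuinely different traversal at similar cost).

-- ===== PORT A =====
-- Literal port of A: for shift in range(partitions), append the [shift::partitions] slices.
-- Inside the loop step = partitions ≠ 0, so slice? is never none; `.getD []` is never taken.
def makeSubVideos (imageList : List String) (target_labels : List Int) (partitions : Int) : List (List String) × List (List Int) × List (List String) :=
  (PySem.List.pyRange 0 partitions 1).foldl
    (fun (acc : List (List String) × List (List Int) × List (List String)) shift =>
      (acc.1 ++ [(PySem.List.slice? imageList (some shift) none partitions).getD []],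
       acc.2.1 ++ [(PySem.List.slice? target_labels (some shift) none partitions).getD []],
       acc.2.2 ++ [(PySem.List.slice? imageList (some shift) none partitions).getD []]))
    ([], [], [])

-- ===== PORT B =====
-- `bucket[i % partitions].append(x)`, one scatter step of Source B's loops
def pvScatterStep {α : Type} (p : Int) (b : List (List α)) (ix : Int × α) : List (List α) :=
  b.modify (PySem.Int.mod ix.1 p).toNat (fun l => l ++ [ix.2])

def makeSubVideos_alt (imageList : List String) (target_labels : List Int) (partitions : Int) : List (List String) × List (List Int) × List (List String) :=
  if partitions ≤ 0 then ([], [], []) else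
  let p := partitions.toNat
  -- first loop of Source B: scatter imageList simultaneously into images and paths
  let ip := (PySem.List.enumerate imageList).foldl
    (fun (ac : List (List String) × List (List String)) ix =>
      (pvScatterStep partitions ac.1 ix, pvScatterStep partitions ac.2 ix))
    (List.replicate p [], List.replicate p [])
  -- second loop of Source B: scatter target_labels into labels
  let labels := (PySem.List.enumerate target_labels).foldl (pvScatterStep partitions) (List.replicate p [])
  (ip.1, labels, ip.2)

-- ===== PRECONDITION & SPEC =====
def Spec_makeSubVideos (imageList : List String) (target_labels : List Int) (partitions : Int) (out : List (List String) × List (List Int) × List (List String)) : Prop := out = makeSubVideos_alt imageList target_labels partitions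
instance (imageList : List String) (target_labels : List Int) (partitions : Int) (out : List (List String) × List (List Int) × List (List String)) : Decidable (Spec_makeSubVideos imageList target_labels partitions out) := by unfold Spec_makeSubVideos; infer_instance

-- ===== CLAIM (what is proved, stated in full; the proofs are below) =====
def Claim_equal_makeSubVideos : Prop := ∀ (imageList : List String) (target_labels : List Int) (partitions : Int), Dom_makeSubVideos imageList target_labels partitions → Spec_makeSubVideos imageList target_labels partitions (makeSubVideos imageList target_labels partitions)

-- ===== LEMMAS AND PROOFS =====

-- every p-th element of a list (the common value both sides are shown to compute)
def everyP {α : Type} (p : Nat) : List α → List α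
  | [] => []
  | x :: xs => x :: everyP p (xs.drop (p - 1))
termination_by xs => xs.length
decreasing_by simp [List.length_drop]; try omega

@[simp] theorem pvEveryP_nil {α : Type} (p : Nat) : everyP p ([] : List α) = [] := by
  rw [everyP]

theorem pvEveryP_cons {α : Type} (p : Nat) (x : α) (xs : List α) :
    everyP p (x :: xs) = x :: everyP p (xs.drop (p - 1)) := by
  rw [everyP]

-- small mod facts (p is a variable, so omega cannot see through %)
theorem pvMod_lt_of_lt (a p : Nat) (h : a < p) : a % p = a := Nat.mod_eq_of_lt h

theorem pvMod_sub (a p : Nat) (h1 : p ≤ a) (h2 : a < 2 * p) : a % p = a - p := by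
  rw [Nat.mod_eq_sub_mod h1, Nat.mod_eq_of_lt (by omega)]

theorem pvSucc_mod (k p : Nat) : (k % p + 1) % p = (k + 1) % p := by
  conv_rhs => rw [Nat.add_mod]
  rw [Nat.add_mod (k % p) 1 p, Nat.mod_mod]

-- the bucket index of the NEXT element that lands in bucket j, one scatter step later
theorem pvIdxStep {j c p : Nat} (hj : j < p) (hc : c < p) (hne : c ≠ j) :
    (j + p - (c + 1) % p) % p + 1 = (j + p - c) % p := by
  by_cases h1 : c + 1 < p
  · rw [pvMod_lt_of_lt _ _ h1]
    by_cases h2 : c < j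
    · rw [pvMod_sub (j + p - (c + 1)) p (by omega) (by omega),
        pvMod_sub (j + p - c) p (by omega) (by omega)]
      omega
    · rw [pvMod_lt_of_lt (j + p - (c + 1)) p (by omega),
        pvMod_lt_of_lt (j + p - c) p (by omega)]
      omega
  · have h4 : c + 1 = p := by omega
    rw [h4, Nat.mod_self, Nat.sub_zero, pvMod_sub (j + p) p (by omega) (by omega),
      pvMod_lt_of_lt (j + p - c) p (by omega)]
    omega

-- core slice fact: the filterMap index form equals everyP
theorem pvCore {α : Type} (p : Nat) (hp : 0 < p) (xs : List α) :
    ∀ d s, xs.length - s ≤ d →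
      List.filterMap (fun k => xs[(s + p * k : Nat)]?) (List.range ((xs.length - s + p - 1) / p))
        = everyP p (xs.drop s) := by
  intro d
  induction d with
  | zero =>
    intro s hs
    have hls : xs.length ≤ s := by omega
    rw [List.drop_of_length_le hls, Nat.div_eq_of_lt (by omega)]
    simp
  | succ d ih =>
    intro s hs
    by_cases hls : xs.length ≤ s
    · rw [List.drop_of_length_le hls, Nat.div_eq_of_lt (by omega)]
      simp
    · push_neg at hls
      have hc : (xs.length - s + p - 1) / p = (xs.length - s - 1) / p + 1 := by
        have : xs.length - s + p - 1 = (xs.length - s - 1) + p := by omega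
        rw [this, Nat.add_div_right _ hp]
      rw [hc, List.range_succ_eq_map, List.filterMap_cons, List.filterMap_map]
      have h0 : xs[(s + p * 0 : Nat)]? = some xs[s] := by
        simp [List.getElem?_eq_getElem hls]
      rw [h0]
      have hfun : (fun k => xs[(s + p * k : Nat)]?) ∘ Nat.succ
          = fun k => xs[(s + p + p * k : Nat)]? := by
        funext k
        simp only [Function.comp]
        congr 1
        rw [Nat.mul_succ]
        omega
      rw [hfun]
      have hcount : (xs.length - s - 1) / p = (xs.length - (s + p) + p - 1) / p := by
        by_cases hbig : s + p ≤ xs.length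
        · congr 1; omega
        · rw [Nat.div_eq_of_lt (by omega), Nat.div_eq_of_lt (by omega)]
      rw [hcount, ih (s + p) (by omega)]
      rw [List.drop_eq_getElem_cons hls, pvEveryP_cons, List.drop_drop]
      have hsum : s + 1 + (p - 1) = s + p := by omega
      rw [hsum]

-- A's slice xs[j::p] (0 < p) is everyP of the dropped list
theorem pvSlice_eq {α : Type} (xs : List α) (j p : Nat) (hp : 0 < p) :
    PySem.List.slice? xs (some (j : Int)) none (p : Int) = some (everyP p (xs.drop j)) := by
  unfold PySem.List.slice? PySem.List.sliceIndices
  have hp' : (p : Int) ≠ 0 := by exact_mod_cast hp.ne'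
  have hpneg : ¬ ((p : Int) < 0) := not_lt.mpr (Int.natCast_nonneg p)
  have hjneg : ¬ ((j : Int) < 0) := not_lt.mpr (Int.natCast_nonneg j)
  simp only [hp', if_false, hpneg, hjneg]
  by_cases hj : j < xs.length
  · have hmin : min (j : Int) (xs.length : Int) = (j : Int) := by
      simp; omega
    have hlt : (j : Int) < (xs.length : Int) := by exact_mod_cast hj
    have hpos : (0 : Int) < (p : Int) := by exact_mod_cast hp
    simp only [hmin, hpos, if_true, hlt]
    have hcast : ((xs.length : Int) - (j : Int) + (p : Int) - 1) = ((xs.length - j + p - 1 : Nat) : Int) := by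
      push_cast; omega
    rw [hcast, ← Int.natCast_div, Int.toNat_natCast]
    congr 1
    rw [← pvCore p hp xs (xs.length - j) j le_rfl]
    apply List.filterMap_congr
    intro k _
    have hidx : ((j : Int) + (p : Int) * (k : Int)).toNat = j + p * k := by
      push_cast; omega
    rw [hidx]
  · push_neg at hj
    have hmin : min (j : Int) (xs.length : Int) = (xs.length : Int) := by
      simp; omega
    have hpos : (0 : Int) < (p : Int) := by exact_mod_cast hp
    have hnlt : ¬ ((xs.length : Int) < (xs.length : Int)) := lt_irrefl _
    simp only [hmin, hpos, if_true, hnlt, if_false]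
    rw [List.drop_of_length_le hj]
    simp

-- A's triple fold is a triple of maps
theorem pvTripleFold {f : Int → List String} {g : Int → List Int} {h : Int → List String}
    (l : List Int) :
    ∀ (a : List (List String)) (b : List (List Int)) (c : List (List String)),
      l.foldl (fun acc shift => (acc.1 ++ [f shift], acc.2.1 ++ [g shift], acc.2.2 ++ [h shift])) (a, b, c)
        = (a ++ l.map f, b ++ l.map g, c ++ l.map h) := by
  induction l with
  | nil => intro a b c; simp
  | cons x t ih => intro a b c; simp [List.foldl_cons, ih]

-- scatter fold preserves the number of buckets
theorem pvScatterLen {α : Type} (P : Int) (l : List (Int × α)) :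
    ∀ b : List (List α), (l.foldl (pvScatterStep P) b).length = b.length := by
  induction l with
  | nil => intro b; rfl
  | cons x t ih => intro b; rw [List.foldl_cons, ih]; simp [pvScatterStep]

-- scatter invariant: bucket j of the fold over enumerate xs k
theorem pvScatterInv {α : Type} (p : Nat) (hp : 0 < p) (xs : List α) :
    ∀ (k : Nat) (b : List (List α)), b.length = p →
      ∀ j, j < p →
        ((PySem.List.enumerate xs (k : Int)).foldl (pvScatterStep (p : Int)) b)[j]?
          = b[j]?.map (fun l => l ++ everyP p (xs.drop ((j + p - k % p) % p))) := by
  induction xs with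
  | nil =>
    intro k b hb j hj
    simp only [PySem.List.enumerate, List.foldl_nil]
    rw [List.drop_of_length_le (by simp)]
    cases b[j]? <;> simp
  | cons x t ih =>
    intro k b hb j hj
    have hkp : k % p < p := Nat.mod_lt _ hp
    simp only [PySem.List.enumerate, List.foldl_cons]
    have hk1 : ((k : Int) + 1) = ((k + 1 : Nat) : Int) := by push_cast; ring
    rw [hk1, ih (k + 1) _ (by simp [pvScatterStep, hb]) j hj]
    have hstep : pvScatterStep (p : Int) b ((k : Int), x) = b.modify (k % p) (fun l => l ++ [x]) := by
      simp only [pvScatterStep]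
      rw [PySem.Int.mod_natCast, Int.toNat_natCast]
    rw [hstep, List.getElem?_modify]
    by_cases hjk : k % p = j
    · subst hjk
      have hd : (k % p + p - (k + 1) % p) % p = p - 1 := by
        rw [← pvSucc_mod]
        by_cases h1 : k % p + 1 < p
        · rw [pvMod_lt_of_lt _ _ h1, pvMod_lt_of_lt (k % p + p - (k % p + 1)) p (by omega)]
          omega
        · have h4 : k % p + 1 = p := by omega
          rw [h4, Nat.mod_self, Nat.sub_zero,
            pvMod_sub (k % p + p) p (by omega) (by omega)]
          omega
      have hdrop : (k % p + p - k % p) % p = 0 := by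
        have h5 : k % p + p - k % p = p := by omega
        rw [h5, Nat.mod_self]
      rw [hd, hdrop]
      cases b[k % p]? <;> simp [pvEveryP_cons]
    · have hstep2 : (j + p - k % p) % p = (j + p - (k + 1) % p) % p + 1 := by
        rw [← pvSucc_mod]
        exact (pvIdxStep hj hkp hjk).symm
      rw [hstep2, List.drop_succ_cons]
      cases b[j]? <;> simp [hjk]

-- B's first loop (a pair of buckets) is two independent scatter folds
theorem pvPairFold {α : Type} (P : Int) (l : List (Int × α)) :
    ∀ (b c : List (List α)),
      l.foldl (fun ac ix => (pvScatterStep P ac.1 ix, pvScatterStep P ac.2 ix)) (b, c)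
        = (l.foldl (pvScatterStep P) b, l.foldl (pvScatterStep P) c) := by
  induction l with
  | nil => intro b c; rfl
  | cons x t ih => intro b c; rw [List.foldl_cons, List.foldl_cons, List.foldl_cons, ih]

-- B's scatter of a whole list equals the list of everyP values
theorem pvScatterList {α : Type} (p : Nat) (hp : 0 < p) (xs : List α) :
    (PySem.List.enumerate xs 0).foldl (pvScatterStep (p : Int)) (List.replicate p ([] : List α))
      = (List.range p).map (fun j => everyP p (xs.drop j)) := by
  apply List.ext_getElem?
  intro j
  by_cases hj : j < p
  · have h0 : ((0 : Int)) = ((0 : Nat) : Int) := rfl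
    rw [h0, pvScatterInv p hp xs 0 _ (by simp) j hj]
    have hrep : (List.replicate p ([] : List α))[j]? = some [] := by
      simp [hj]
    have hidx : (j + p - 0 % p) % p = j := by
      rw [Nat.zero_mod, Nat.sub_zero, pvMod_sub (j + p) p (by omega) (by omega)]
      omega
    rw [hrep, hidx]
    simp [hj]
  · push_neg at hj
    have h1 : ((PySem.List.enumerate xs 0).foldl (pvScatterStep (p : Int)) (List.replicate p ([] : List α))).length = p := by
      rw [pvScatterLen]; simp
    rw [List.getElem?_eq_none (by omega), List.getElem?_eq_none (by simp; omega)]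

-- A as a triple of maps, for positive partitions
theorem pvA_pos (img : List String) (lab : List Int) (p : Nat) (hp : 0 < p) :
    makeSubVideos img lab (p : Int)
      = ((List.range p).map (fun j => everyP p (img.drop j)),
         (List.range p).map (fun j => everyP p (lab.drop j)),
         (List.range p).map (fun j => everyP p (img.drop j))) := by
  unfold makeSubVideos
  rw [PySem.List.pyRange_zero_natCast, pvTripleFold]
  simp only [List.nil_append, List.map_map]
  refine Prod.ext ?_ (Prod.ext ?_ ?_) <;>
    · apply List.map_congr_left
      intro j hj
      have hjp : j < p := List.mem_range.mp hj
      simp only [Function.comp]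
      rw [pvSlice_eq _ j p hp]
      rfl

-- ===== VERDICT (by name: the statement is the Claim_ definition above) =====
theorem makeSubVideos_spec : Claim_equal_makeSubVideos := by
  intro img lab P _
  unfold Spec_makeSubVideos
  by_cases hP : P ≤ 0
  · unfold makeSubVideos makeSubVideos_alt
    rw [PySem.List.pyRange_of_pos 0 P (by norm_num)]
    simp [show ¬ (0 : Int) < P by omega, hP]
  · have hp : 0 < P.toNat := by omega
    have hPp : P = (P.toNat : Int) := (Int.toNat_of_nonneg (by omega)).symm
    rw [hPp, pvA_pos img lab P.toNat hp]
    unfold makeSubVideos_alt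
    rw [if_neg (by exact_mod_cast (by omega : ¬ P.toNat ≤ 0))]
    simp only [Int.toNat_natCast]
    rw [pvPairFold, pvScatterList P.toNat hp img, pvScatterList P.toNat hp lab]
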